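-- pv_equiv track=rewrite | github.com/iamrita-ai/SERENA-EXAM-PULSE | src/services/exams_service.py | _auto_keywords_from_text
-- ===== SOURCE A (Python) =====
-- def _auto_keywords_from_text(text_lower: str) -> list[str]:
--     """
--     Agar 'Keywords:' line nahi hai to basic auto keywords generate karo.
--     Ye sirf matching me help ke liye hai, magic nahi hai.
--     """
--     kws: list[str] = []
--
--     if "12th" in text_lower or "10+2" in text_lower or "intermediate" in text_lower:
--         kws.extend(["12th", "10+2", "intermediate", "higher secondary"])
--
--     if "graduate" in text_lower or "graduation" in text_lower:
--         kws.extend(["graduate", "graduation", "bachelor"])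
--
--     for key in ("b.tech", "b.e", "bca", "mca", "b.sc", "bsc", "b.com", "bcom"):
--         if key in text_lower:
--             kws.append(key)
--
--     if "diploma" in text_lower:
--         kws.append("diploma")
--
--     if "iti" in text_lower:
--         kws.append("iti")
--
--     # unique
--     return sorted(set(kws))
-- ===== SOURCE B (Python) =====
-- # Sorted table of (output keyword, trigger substrings that make it appear).
-- # The result is built directly in its final sorted order by filtering this
-- # presorted candidate list -- no accumulator, no set(), no sorted() at runtime.
-- _E12 = ["12th", "10+2", "intermediate"]
-- _GRAD = ["graduate", "graduation"]
-- _TABLE = [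
--     ("10+2", _E12),
--     ("12th", _E12),
--     ("b.com", ["b.com"]),
--     ("b.e", ["b.e"]),
--     ("b.sc", ["b.sc"]),
--     ("b.tech", ["b.tech"]),
--     ("bachelor", _GRAD),
--     ("bca", ["bca"]),
--     ("bcom", ["bcom"]),
--     ("bsc", ["bsc"]),
--     ("diploma", ["diploma"]),
--     ("graduate", _GRAD),
--     ("graduation", _GRAD),
--     ("higher secondary", _E12),
--     ("intermediate", _E12),
--     ("iti", ["iti"]),
--     ("mca", ["mca"]),
-- ]
--
--
-- def _auto_keywords_from_text(text_lower: str) -> list[str]: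
--     return [kw for kw, trigs in _TABLE if any(t in text_lower for t in trigs)]
-- ===== Notes on version B (the rewrite author's own statement) =====
-- stated objective: alternative
-- what changed: Inverts the mapping: instead of accumulating trigger-to-output lists and then deduplicating and sorting, B filters a precomputed sorted list of candidate keywords, each paired with the triggers that imply it, so the result is produced directly in final order with no set() and no sorted().
import Mathlib
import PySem

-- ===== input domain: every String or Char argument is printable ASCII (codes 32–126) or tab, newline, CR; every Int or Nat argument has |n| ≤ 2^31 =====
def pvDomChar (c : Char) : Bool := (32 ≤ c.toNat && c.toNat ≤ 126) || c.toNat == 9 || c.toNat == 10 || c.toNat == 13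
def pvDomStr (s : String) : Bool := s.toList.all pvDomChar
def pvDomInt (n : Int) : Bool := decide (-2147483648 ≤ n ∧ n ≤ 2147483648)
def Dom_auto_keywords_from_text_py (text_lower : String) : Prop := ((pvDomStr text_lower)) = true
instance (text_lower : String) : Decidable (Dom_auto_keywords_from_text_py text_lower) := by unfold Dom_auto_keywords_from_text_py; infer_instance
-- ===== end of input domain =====

-- B inverts the mapping: it filters a precomputed sorted candidate table (keyword, implying triggers),
-- producing the result directly in final order with no accumulator, no set() and no sorted() (objective: alternative).

-- ===== PORT A =====
def auto_keywords_from_text_py (text_lower : String) : List String :=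
  let kws : List String := []
  let kws := if PySem.Str.isIn "12th" text_lower || PySem.Str.isIn "10+2" text_lower || PySem.Str.isIn "intermediate" text_lower
             then kws ++ ["12th", "10+2", "intermediate", "higher secondary"] else kws
  let kws := if PySem.Str.isIn "graduate" text_lower || PySem.Str.isIn "graduation" text_lower
             then kws ++ ["graduate", "graduation", "bachelor"] else kws
  let kws := ["b.tech", "b.e", "bca", "mca", "b.sc", "bsc", "b.com", "bcom"].foldl
      (fun acc key => if PySem.Str.isIn key text_lower then acc ++ [key] else acc) kws
  let kws := if PySem.Str.isIn "diploma" text_lower then kws ++ ["diploma"] else kws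
  let kws := if PySem.Str.isIn "iti" text_lower then kws ++ ["iti"] else kws
  PySem.List.sorted (PySem.Set.ofList kws) (fun x => x) false

-- ===== PORT B =====
def kwTable : List (String × List String) :=
  [ ("10+2", ["12th", "10+2", "intermediate"]),
    ("12th", ["12th", "10+2", "intermediate"]),
    ("b.com", ["b.com"]),
    ("b.e", ["b.e"]),
    ("b.sc", ["b.sc"]),
    ("b.tech", ["b.tech"]),
    ("bachelor", ["graduate", "graduation"]),
    ("bca", ["bca"]),
    ("bcom", ["bcom"]),
    ("bsc", ["bsc"]),
    ("diploma", ["diploma"]),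
    ("graduate", ["graduate", "graduation"]),
    ("graduation", ["graduate", "graduation"]),
    ("higher secondary", ["12th", "10+2", "intermediate"]),
    ("intermediate", ["12th", "10+2", "intermediate"]),
    ("iti", ["iti"]),
    ("mca", ["mca"]) ]

def auto_keywords_from_text_py_alt (text_lower : String) : List String :=
  (kwTable.filter (fun p => p.2.any (fun t => PySem.Str.isIn t text_lower))).map Prod.fst

-- ===== PRECONDITION & SPEC =====
def Spec_auto_keywords_from_text_py (text_lower : String) (out : List String) : Prop := out = auto_keywords_from_text_py_alt text_lower
instance (text_lower : String) (out : List String) : Decidable (Spec_auto_keywords_from_text_py text_lower out) := by unfold Spec_auto_keywords_from_text_py; infer_instance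

-- ===== CLAIM (what is proved, stated in full; the proofs are below) =====
def Claim_equal_auto_keywords_from_text_py : Prop := ∀ (text_lower : String), Dom_auto_keywords_from_text_py text_lower → Spec_auto_keywords_from_text_py text_lower (auto_keywords_from_text_py text_lower)

-- ===== LEMMAS AND PROOFS =====
theorem pv_mem_ite_append {A : Type} (c : Prop) [Decidable c] (l m : List A) (x : A) :
    (x ∈ (if c then l ++ m else l)) ↔ (x ∈ l ∨ (c ∧ x ∈ m)) := by
  split_ifs with h <;> simp [h]


-- ===== VERDICT (by name: the statement is the Claim_ definition above) =====
set_option maxHeartbeats 4000000 in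
theorem auto_keywords_from_text_py_spec : Claim_equal_auto_keywords_from_text_py := by
  intro t _
  unfold Spec_auto_keywords_from_text_py auto_keywords_from_text_py auto_keywords_from_text_py_alt
  simp only [PySem.List.foldl_append_if_eq_filter]
  have hsub : ((kwTable.filter (fun p => p.2.any (fun s => PySem.Str.isIn s t))).map Prod.fst).Sublist
      (kwTable.map Prod.fst) := List.Sublist.map Prod.fst List.filter_sublist
  have hpw : (kwTable.map Prod.fst).Pairwise (fun a b => a < b) := by
    simp only [String.lt_iff_toList_lt]; decide
  have hpwB := hpw.sublist hsub
  refine PySem.List.sorted_id_eq_of_perm_of_pairwise _ _ ?_ (hpwB.imp le_of_lt)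
  refine (List.perm_ext_iff_of_nodup (hpwB.imp (fun h => ne_of_lt h)) (PySem.Set.nodup_ofList _)).mpr ?_
  intro x
  simp only [PySem.Set.mem_ofList, pv_mem_ite_append, List.mem_map, List.mem_filter, kwTable,
    List.mem_cons, List.mem_append, List.not_mem_nil,
    List.any_cons, List.any_nil, Bool.or_eq_true, Bool.or_false, false_or, or_false,
    and_assoc, or_and_right, exists_or, exists_eq_left]
  aesop
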